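-- pv_equiv track=rewrite | github.com/minmunui/stitcher-be | stitcher-step1/src/metadata/gps.py | getClusteredIndicesByNumber
-- ===== SOURCE A (Python) =====
-- def getClusteredIndicesByNumber(points, n_clusters) -> list[list[int]]:
--     """
--     Get clustered indices from points, using force divide.
--
--     :param max_iterations : int, maximum number of iterations
--     :param points: list of (x, y) points
--     :param n_clusters: int, number of clusters
--     :return: list of list of indices
--     """
--     # points의 수를 세어서 2개로 나눔, 예를 들어 120개의 점이 있으면 60개씩 나눔 -> [0, 1, ..., 59], [60, 61, ..., 119] 121개의 점이 있으면 60개씩 나누고 1개가 남음 -> [0, 1, ..., 59], [60, 61, ..., 119, 120]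
--     n_points = len(points)
--     n_points_per_cluster = n_points // n_clusters
--     n_points_per_cluster_list = [n_points_per_cluster] * n_clusters
--     for i in range(n_points % n_clusters):
--         n_points_per_cluster_list[i] += 1
--
--     # 각 클러스터에 속하는 점의 인덱스를 저장
--     cluster_indices = []
--     start = 0
--     for n_points in n_points_per_cluster_list:
--         cluster_indices.append(list(range(start, start + n_points)))
--         start += n_points
--
--     return cluster_indices
-- ===== SOURCE B (Python) =====
-- def getClusteredIndicesByNumber(points, n_clusters) -> list[list[int]]:
--     """Closed-form cluster boundaries: cluster i is [i*q + min(i,r), (i+1)*q + min(i+1,r))."""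
--     q, r = divmod(len(points), n_clusters)
--     return [list(range(i * q + min(i, r), (i + 1) * q + min(i + 1, r)))
--             for i in range(n_clusters)]
-- ===== Notes on version B (the rewrite author's own statement) =====
-- stated objective: simpler
-- what changed: Replaces the per-cluster sizes array, the remainder-increment loop and the running start accumulator with a single comprehension computing each cluster's boundaries from the closed form i*q + min(i, r).
import Mathlib
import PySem

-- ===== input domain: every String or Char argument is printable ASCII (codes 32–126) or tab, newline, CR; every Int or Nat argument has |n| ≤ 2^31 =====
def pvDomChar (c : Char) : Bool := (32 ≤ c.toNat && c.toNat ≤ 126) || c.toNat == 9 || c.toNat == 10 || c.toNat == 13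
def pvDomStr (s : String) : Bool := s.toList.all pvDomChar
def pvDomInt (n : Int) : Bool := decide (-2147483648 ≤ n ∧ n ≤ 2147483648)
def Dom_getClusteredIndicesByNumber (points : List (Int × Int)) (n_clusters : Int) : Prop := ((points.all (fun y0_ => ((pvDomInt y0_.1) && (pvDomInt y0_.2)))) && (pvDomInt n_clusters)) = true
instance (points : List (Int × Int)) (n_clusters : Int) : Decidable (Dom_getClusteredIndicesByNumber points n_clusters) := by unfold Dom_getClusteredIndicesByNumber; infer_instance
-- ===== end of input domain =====

-- B replaces A's sizes array + remainder loop + start accumulator with the closed-form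
-- boundary formula i*q + min(i, r) for each cluster (objective: simpler).

-- ===== PORT A =====
def getClusteredIndicesByNumber (points : List (Int × Int)) (n_clusters : Int) : List (List Int) :=
  let n_points : Int := points.length
  let n_points_per_cluster := PySem.Int.floordiv n_points n_clusters
  let sizes0 : List Int := List.replicate n_clusters.toNat n_points_per_cluster
  let sizes :=
    (PySem.List.pyRange 0 (PySem.Int.mod n_points n_clusters) 1).foldl
      (fun l i => PySem.List.pySetD l i (PySem.List.pyGetD l i 0 + 1)) sizes0
  let res :=
    sizes.foldl
      (fun (st : List (List Int) × Int) s =>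
        (st.1 ++ [PySem.List.pyRange st.2 (st.2 + s) 1], st.2 + s)) ([], 0)
  res.1

-- ===== PORT B =====
def getClusteredIndicesByNumber_alt (points : List (Int × Int)) (n_clusters : Int) : List (List Int) :=
  let q := PySem.Int.floordiv (points.length : Int) n_clusters
  let r := PySem.Int.mod (points.length : Int) n_clusters
  (PySem.List.pyRange 0 n_clusters 1).map
    (fun i => PySem.List.pyRange (i * q + min i r) ((i + 1) * q + min (i + 1) r) 1)

-- ===== PRECONDITION & SPEC =====
-- Pre_ excludes only n_clusters = 0, where Python A raises ZeroDivisionError.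
def Pre_getClusteredIndicesByNumber (points : List (Int × Int)) (n_clusters : Int) : Prop := n_clusters ≠ 0
instance (points : List (Int × Int)) (n_clusters : Int) : Decidable (Pre_getClusteredIndicesByNumber points n_clusters) := by unfold Pre_getClusteredIndicesByNumber; infer_instance
def pvWitness_getClusteredIndicesByNumber : (List (Int × Int)) × Int := ([(1, 2), (3, 4), (5, 6)], 2)
def Spec_getClusteredIndicesByNumber (points : List (Int × Int)) (n_clusters : Int) (out : List (List Int)) : Prop := out = getClusteredIndicesByNumber_alt points n_clusters
instance (points : List (Int × Int)) (n_clusters : Int) (out : List (List Int)) : Decidable (Spec_getClusteredIndicesByNumber points n_clusters out) := by unfold Spec_getClusteredIndicesByNumber; infer_instance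

-- ===== CLAIM (what is proved, stated in full; the proofs are below) =====
def Claim_equal_getClusteredIndicesByNumber : Prop := ∀ (points : List (Int × Int)) (n_clusters : Int), Dom_getClusteredIndicesByNumber points n_clusters → Pre_getClusteredIndicesByNumber points n_clusters → Spec_getClusteredIndicesByNumber points n_clusters (getClusteredIndicesByNumber points n_clusters)

-- ===== LEMMAS AND PROOFS =====

-- A's second loop, written as structural recursion (proof helper only).
def pvGo (sizes : List Int) (start : Int) : List (List Int) :=
  match sizes with
  | [] => []
  | s :: rest => PySem.List.pyRange start (start + s) 1 :: pvGo rest (start + s)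

lemma pvGo_length (sizes : List Int) (start : Int) : (pvGo sizes start).length = sizes.length := by
  induction sizes generalizing start with
  | nil => rfl
  | cons s rest ih => simp [pvGo, ih]

lemma pvFold_eq_go (sizes : List Int) (acc : List (List Int)) (start : Int) :
    (sizes.foldl
      (fun (st : List (List Int) × Int) s =>
        (st.1 ++ [PySem.List.pyRange st.2 (st.2 + s) 1], st.2 + s)) (acc, start)).1
    = acc ++ pvGo sizes start := by
  induction sizes generalizing acc start with
  | nil => simp [pvGo]
  | cons s rest ih => simp [pvGo, ih]

lemma pvGo_getElem (sizes : List Int) (start : Int) (i : Nat) (h : i < sizes.length) :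
    (pvGo sizes start)[i]'(by rw [pvGo_length]; exact h)
    = PySem.List.pyRange (start + (sizes.take i).sum) (start + (sizes.take (i + 1)).sum) 1 := by
  induction sizes generalizing start i with
  | nil => simp at h
  | cons s rest ih =>
    cases i with
    | zero => simp [pvGo]
    | succ j =>
      have hj : j < rest.length := by simpa using h
      have hrec := ih (start + s) j hj
      simp only [pvGo, List.getElem_cons_succ]
      rw [hrec]
      simp only [List.take_succ_cons, List.sum_cons]
      congr 1 <;> ring

-- The increment loop turns [q] * m into r copies of q+1 followed by m-r copies of q.
lemma pvIncr_loop (q : Int) (r m : Nat) (h : r ≤ m) :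
    (PySem.List.pyRange 0 (r : Int) 1).foldl
      (fun l i => PySem.List.pySetD l i (PySem.List.pyGetD l i 0 + 1)) (List.replicate m q)
    = List.replicate r (q + 1) ++ List.replicate (m - r) q := by
  induction r with
  | zero => simp [PySem.List.pyRange_one_eq_nil]
  | succ t ih =>
    have ht : t ≤ m := Nat.le_of_succ_le h
    have hsplit : PySem.List.pyRange 0 ((t : Int) + 1) 1
        = PySem.List.pyRange 0 (t : Int) 1 ++ [(t : Int)] :=
      PySem.List.pyRange_one_succ_right (by exact_mod_cast Nat.zero_le t)
    have hcast : ((t + 1 : Nat) : Int) = (t : Int) + 1 := by push_cast; ring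
    rw [hcast, hsplit, List.foldl_append, ih ht]
    have hlt : t < m := h
    have hrep : List.replicate (m - t) q = q :: List.replicate (m - (t + 1)) q := by
      have : m - t = (m - (t + 1)) + 1 := by omega
      rw [this, List.replicate_succ]
    have hget : (List.replicate t (q + 1) ++ q :: List.replicate (m - (t + 1)) q).getD t 0 = q := by
      simp [List.getD]
    have hset : (List.replicate t (q + 1) ++ q :: List.replicate (m - (t + 1)) q).set t (q + 1)
        = List.replicate (t + 1) (q + 1) ++ List.replicate (m - (t + 1)) q := by
      rw [List.set_append_right _ _ (by simp)]
      simp [List.replicate_succ', List.append_assoc]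
    simp only [List.foldl_cons, List.foldl_nil, PySem.List.pyGetD_natCast,
      PySem.List.pySetD_natCast]
    rw [hrep, hget, hset]

lemma pvSum_take_sizes (q : Int) (r m i : Nat) (hrm : r ≤ m) (him : i ≤ m) :
    ((List.replicate r (q + 1) ++ List.replicate (m - r) q).take i).sum
    = (i : Int) * q + (min i r : Nat) := by
  rw [List.take_append]
  simp only [List.take_replicate, List.length_replicate, List.sum_append,
    List.sum_replicate, nsmul_eq_mul]
  rcases le_or_gt i r with hi | hi
  · have h1 : min i r = i := min_eq_left hi
    have h2 : i - r = 0 := by omega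
    rw [h1, h2]
    simp only [Nat.zero_min, Nat.cast_zero, zero_mul, add_zero]
    ring
  · have h1 : min i r = r := min_eq_right (le_of_lt hi)
    have h2 : min (i - r) (m - r) = i - r := by omega
    have h3 : ((i - r : Nat) : Int) = (i : Int) - (r : Nat) := by omega
    rw [h1, h2, h3]
    ring

-- Main equivalence for a positive cluster count.
lemma pvMain_pos (points : List (Int × Int)) (k : Int) (hk : 0 < k) :
    getClusteredIndicesByNumber points k = getClusteredIndicesByNumber_alt points k := by
  set n : Int := (points.length : Int) with hn
  set q : Int := PySem.Int.floordiv n k with hq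
  set r : Int := PySem.Int.mod n k with hr
  have hr0 : 0 ≤ r := PySem.Int.mod_nonneg n hk
  have hrk : r < k := PySem.Int.mod_lt n hk
  have hrt : (r.toNat : Int) = r := Int.toNat_of_nonneg hr0
  have hkt : (k.toNat : Int) = k := Int.toNat_of_nonneg (le_of_lt hk)
  have hrm : r.toNat ≤ k.toNat := by omega
  -- reduce A to pvGo over the explicit sizes list
  have hA : getClusteredIndicesByNumber points k
      = pvGo (List.replicate r.toNat (q + 1) ++ List.replicate (k.toNat - r.toNat) q) 0 := by
    unfold getClusteredIndicesByNumber
    simp only [← hn, ← hq, ← hr]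
    rw [show PySem.List.pyRange 0 r 1 = PySem.List.pyRange 0 (r.toNat : Int) 1 by rw [hrt]]
    rw [pvIncr_loop q r.toNat k.toNat hrm, pvFold_eq_go]
    simp
  rw [hA]
  unfold getClusteredIndicesByNumber_alt
  simp only [← hn, ← hq, ← hr]
  have hlenA : (pvGo (List.replicate r.toNat (q + 1) ++ List.replicate (k.toNat - r.toNat) q) 0).length = k.toNat := by
    rw [pvGo_length]; simp; omega
  have hlenB : ((PySem.List.pyRange 0 k 1).map
      (fun i => PySem.List.pyRange (i * q + min i r) ((i + 1) * q + min (i + 1) r) 1)).length = k.toNat := by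
    simp [PySem.List.length_pyRange_one]
  apply List.ext_getElem (by rw [hlenA, hlenB])
  intro i h1 h2
  have hik : i < k.toNat := by rw [hlenA] at h1; exact h1
  have hsz : i < (List.replicate r.toNat (q + 1) ++ List.replicate (k.toNat - r.toNat) q).length := by
    simp; omega
  rw [pvGo_getElem _ _ i hsz]
  rw [List.getElem_map, PySem.List.getElem_pyRange_one]
  rw [pvSum_take_sizes q r.toNat k.toNat i hrm (le_of_lt hik),
      pvSum_take_sizes q r.toNat k.toNat (i + 1) hrm hik]
  have hmin1 : ((min i r.toNat : Nat) : Int) = min (i : Int) r := by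
    rw [Nat.cast_min, hrt]
  have hmin2 : ((min (i + 1) r.toNat : Nat) : Int) = min ((i : Int) + 1) r := by
    rw [Nat.cast_min, hrt]; push_cast; ring_nf
  simp only [zero_add]
  rw [hmin1, hmin2]
  congr 1 <;> (push_cast; ring)

-- Negative cluster count: both sides are [].
lemma pvMain_neg (points : List (Int × Int)) (k : Int) (hk : k < 0) :
    getClusteredIndicesByNumber points k = getClusteredIndicesByNumber_alt points k := by
  have hmod := (PySem.Int.mod_neg_bounds (a := (points.length : Int)) hk).2
  unfold getClusteredIndicesByNumber getClusteredIndicesByNumber_alt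
  simp only []
  rw [PySem.List.pyRange_one_eq_nil hmod, PySem.List.pyRange_one_eq_nil (le_of_lt hk)]
  simp [Int.toNat_of_nonpos (le_of_lt hk)]

-- ===== VERDICT (by name: the statement is the Claim_ definition above) =====
theorem getClusteredIndicesByNumber_spec : Claim_equal_getClusteredIndicesByNumber := by
  intro points k _ hk
  unfold Spec_getClusteredIndicesByNumber
  rcases lt_trichotomy k 0 with h | h | h
  · exact (pvMain_neg points k h).symm ▸ rfl
  · exact absurd h hk
  · exact (pvMain_pos points k h).symm ▸ rfl
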